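-- pv_equiv track=rewrite | github.com/ssssssssssn/WCDFP-Stochastic-Release-Patterns-Chernoff-Bound | StochasticReleasePatterns_GenerationVersion/algorithms/resample.py | resample_T
-- ===== SOURCE A (Python) =====
-- import math
--
-- def resample_T(X, cut):
--     p = 0
--     result = []
--     q = math.ceil(len(X) / cut)
--     for i in range(0, len(X)):
--         tmp = len(X) - i - 1
--         p = p + X[tmp][1]
--         if ((i + 1) % q == 0) or (i == len(X) - 1):
--             result.append([X[tmp][0], p])
--             p = 0
--     result.sort(reverse=False)
--     return result
-- ===== SOURCE B (Python) =====
-- import math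
--
-- def resample_T(X, cut):
--     q = math.ceil(len(X) / cut)
--     result = []
--     R = X[::-1]
--     while R:
--         group, R = R[:q], R[q:]
--         result.append([group[-1][0], sum(e[1] for e in group)])
--     result.sort()
--     return result
-- ===== Notes on version B (the rewrite author's own statement) =====
-- stated objective: alternative
-- what changed: A's single indexed pass with a running sum and a modular emission counter ((i+1)%q) is replaced by an explicit chunk-then-aggregate decomposition: reverse the list once, repeatedly split off a slice of q rows and aggregate each slice to [last row's key, sum of second components], then sort.
-- outside the precondition, e.g. on resample_T([[1, 2], [3, 4]], -2): A returns [[1, 2], [3, 4]], B raises IndexError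
import Mathlib
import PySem

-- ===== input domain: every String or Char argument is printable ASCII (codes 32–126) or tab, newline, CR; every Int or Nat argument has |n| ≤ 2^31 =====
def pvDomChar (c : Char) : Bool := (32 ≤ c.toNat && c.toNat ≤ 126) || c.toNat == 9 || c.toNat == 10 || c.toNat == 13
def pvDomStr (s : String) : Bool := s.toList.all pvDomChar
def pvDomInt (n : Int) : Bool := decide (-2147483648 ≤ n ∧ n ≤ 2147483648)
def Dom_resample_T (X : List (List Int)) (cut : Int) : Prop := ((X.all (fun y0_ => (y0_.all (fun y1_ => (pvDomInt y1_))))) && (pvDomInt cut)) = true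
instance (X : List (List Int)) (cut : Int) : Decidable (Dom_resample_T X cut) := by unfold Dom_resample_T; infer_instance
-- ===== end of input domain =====

-- B replaces A's single pass with a running sum and modular emission counter by an
-- explicit chunk-then-aggregate decomposition (reverse, repeatedly split off a slice of
-- q rows, aggregate each slice); objective: alternative decomposition, same cost.

-- ===== PORT A =====
-- math.ceil(len(X) / cut) is ported as the exact ceiling division -((-len) // cut);
-- exact for the list lengths and |cut| ≤ 2^31 admitted by Dom (float error << 1/cut).
-- PySem.Int.mod / pyGetD are total stand-ins for Python's '%' and indexing; the inputs
-- where Python would raise instead (cut = 0 or q = 0, rows shorter than 2) are excluded by Pre_.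
def resample_T (X : List (List Int)) (cut : Int) : List (List Int) :=
  let n : Int := (X.length : Int)
  let q : Int := -(PySem.Int.floordiv (-n) cut)
  let st := (PySem.List.pyRange 0 n 1).foldl
    (fun (st : Int × List (List Int)) i =>
      let tmp := n - i - 1
      let p := st.1 + PySem.List.pyGetD (PySem.List.pyGetD X tmp []) 1 0
      if PySem.Int.mod (i + 1) q = 0 ∨ i = n - 1 then
        (0, st.2 ++ [[PySem.List.pyGetD (PySem.List.pyGetD X tmp []) 0 0, p]])
      else (p, st.2))
    (0, [])
  PySem.List.sorted st.2 (fun x => x) false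

-- ===== PORT B =====
-- Source B's 'while R:' loop: split off the first q rows, aggregate them, recurse on the rest.
-- The 'q ≤ 0' test is only a totality guard (Source B's loop would not terminate there; outside Pre_).
def bLoop (q : Int) (R : List (List Int)) : List (List Int) :=
  if hR : R = [] then []
  else if hq : q ≤ 0 then []
  else
    let group := PySem.List.slice R none (some q)
    [PySem.List.pyGetD (PySem.List.pyGetD group (-1) []) 0 0,
     (group.map (fun e => PySem.List.pyGetD e 1 0)).sum] ::
      bLoop q (PySem.List.slice R (some q) none)
termination_by R.length
decreasing_by
  have hq1 : q = ((q.toNat : Nat) : Int) := (Int.toNat_of_nonneg (by omega)).symm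
  rw [hq1, PySem.List.slice_from_natCast]
  have : 1 ≤ q.toNat := by omega
  have : R.length ≠ 0 := fun h => hR (List.eq_nil_of_length_eq_zero h)
  simp only [List.length_drop]
  omega

def resample_T_alt (X : List (List Int)) (cut : Int) : List (List Int) :=
  let q : Int := -(PySem.Int.floordiv (-(X.length : Int)) cut)   -- math.ceil(len(X)/cut), exact here (see Port A)
  PySem.List.sorted (bLoop q X.reverse) (fun x => x) false

-- ===== PRECONDITION & SPEC =====
-- Pre_ excludes exactly the inputs where a Python raise is involved or the grouping is accidental:
-- rows shorter than 2 (A raises IndexError), cut = 0 (A raises ZeroDivisionError), and negative cut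
-- on nonempty X (A raises ZeroDivisionError when q = 0, and otherwise groups via an accidental
-- negative modulus where B's chunking raises IndexError or does not terminate).
def Pre_resample_T (X : List (List Int)) (cut : Int) : Prop :=
  (0 < cut ∨ (X = [] ∧ cut ≠ 0)) ∧ ∀ r ∈ X, 2 ≤ r.length
instance (X : List (List Int)) (cut : Int) : Decidable (Pre_resample_T X cut) := by
  unfold Pre_resample_T; infer_instance
def pvWitness_resample_T : List (List Int) × Int := ([[1, 2], [3, 4], [5, 6]], 2)

def Spec_resample_T (X : List (List Int)) (cut : Int) (out : List (List Int)) : Prop := out = resample_T_alt X cut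
instance (X : List (List Int)) (cut : Int) (out : List (List Int)) : Decidable (Spec_resample_T X cut out) := by unfold Spec_resample_T; infer_instance

-- ===== CLAIM (what is proved, stated in full; the proofs are below) =====
def Claim_equal_resample_T : Prop := ∀ (X : List (List Int)) (cut : Int), Dom_resample_T X cut → Pre_resample_T X cut → Spec_resample_T X cut (resample_T X cut)

-- ===== LEMMAS AND PROOFS =====

-- common middle form of both loops: walk the reversed list with a countdown c to the
-- next emission, accumulating p; on emission reset the counter to qn and p to 0.
def runA (qn : Nat) : List (List Int) → Nat → Int → List (List Int)
  | [], _, _ => []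
  | r :: rest, c, p =>
    let p' := p + PySem.List.pyGetD r 1 0
    if c = 1 ∨ rest = [] then
      [PySem.List.pyGetD r 0 0, p'] :: runA qn rest qn 0
    else runA qn rest (c - 1) p'

-- (k+1) % qn in terms of k % qn
lemma mod_succ_eq (qn k : Nat) (h1 : 1 ≤ qn) :
    (k + 1) % qn = if k % qn = qn - 1 then 0 else k % qn + 1 := by
  have hlt : k % qn < qn := Nat.mod_lt k (by omega)
  rw [Nat.add_mod]
  split_ifs with h
  · rcases Nat.eq_or_lt_of_le h1 with h2 | h2
    · subst h2; simp [Nat.mod_one]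
    · rw [Nat.mod_eq_of_lt h2, h]
      have : qn - 1 + 1 = qn := by omega
      rw [this, Nat.mod_self]
  · rcases Nat.eq_or_lt_of_le h1 with h2 | h2
    · omega
    · rw [Nat.mod_eq_of_lt h2, Nat.mod_eq_of_lt (by omega)]

-- runA consumes one chunk of c elements at a time
lemma runA_chunk (qn : Nat) (l : List (List Int)) (c : Nat) (p : Int)
    (hl : l ≠ []) (hc : 1 ≤ c) :
    runA qn l c p =
      [PySem.List.pyGetD (PySem.List.pyGetD (l.take c) (-1) []) 0 0,
       p + ((l.take c).map (fun e => PySem.List.pyGetD e 1 0)).sum] ::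
        runA qn (l.drop c) qn 0 := by
  induction l generalizing c p with
  | nil => exact absurd rfl hl
  | cons r rest ih =>
    by_cases hemit : c = 1 ∨ rest = []
    · rcases hemit with hc1 | hrest
      · subst hc1
        simp only [runA, List.take_succ_cons, List.take_zero, List.drop_succ_cons, List.drop_zero]
        rw [PySem.List.pyGetD_neg_one ([r]) [] (by simp)]
        simp
      · subst hrest
        have htake : (([r] : List (List Int)).take c) = [r] := by
          cases c with
          | zero => omega
          | succ c' => simp
        have hdrop : (([r] : List (List Int)).drop c) = [] := by
          cases c with
          | zero => omega
          | succ c' => simp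
        simp only [runA, htake, hdrop]
        rw [PySem.List.pyGetD_neg_one ([r]) [] (by simp)]
        simp
    · have hboth := hemit
      push Not at hboth
      obtain ⟨hc1, hrest⟩ := hboth
      simp only [runA]
      rw [if_neg hemit]
      rw [ih (c - 1) (p + PySem.List.pyGetD r 1 0) hrest (by omega)]
      have hc' : c = (c - 1) + 1 := by omega
      have htk : (r :: rest).take c = r :: rest.take (c - 1) := by
        rw [hc']; simp
      have hdr : (r :: rest).drop c = rest.drop (c - 1) := by
        rw [hc']; simp
      rw [htk, hdr]
      have hg : rest.take (c - 1) ≠ [] := by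
        simp only [ne_eq, List.take_eq_nil_iff]
        push Not
        exact ⟨by omega, hrest⟩
      rw [PySem.List.pyGetD_neg_one (rest.take (c - 1)) [] hg,
        PySem.List.pyGetD_neg_one (r :: rest.take (c - 1)) [] (by simp),
        List.getLast_cons hg]
      simp [add_assoc]

-- B's loop is runA
lemma bLoop_eq_runA (qn : Nat) (hq : 1 ≤ qn) :
    ∀ (m : Nat) (R : List (List Int)), R.length ≤ m → bLoop (qn : Int) R = runA qn R qn 0 := by
  intro m
  induction m with
  | zero =>
    intro R hR
    have : R = [] := List.eq_nil_of_length_eq_zero (by omega)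
    subst this
    simp [bLoop, runA]
  | succ m ih =>
    intro R hR
    by_cases hnil : R = []
    · subst hnil; simp [bLoop, runA]
    · rw [bLoop]
      rw [dif_neg hnil, dif_neg (by omega : ¬ (qn : Int) ≤ 0)]
      rw [PySem.List.slice_to_natCast, PySem.List.slice_from_natCast]
      have hlen : R.length ≠ 0 := fun h => hnil (List.eq_nil_of_length_eq_zero h)
      rw [ih (R.drop qn) (by simp [List.length_drop]; omega)]
      rw [runA_chunk qn R qn 0 hnil hq]
      simp

-- A's indexed loop over the suffix of the reversed list is runA
lemma foldA_eq_runA (X : List (List Int)) (qn : Nat) (hq : 1 ≤ qn) :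
    ∀ (tail : List (List Int)) (k : Nat) (p : Int) (acc : List (List Int)),
      X.reverse.drop k = tail →
      ((List.range' k (X.length - k)).foldl
        (fun (st : Int × List (List Int)) (i : Nat) =>
          let tmp := (X.length : Int) - (i : Int) - 1
          let p := st.1 + PySem.List.pyGetD (PySem.List.pyGetD X tmp []) 1 0
          if PySem.Int.mod ((i : Int) + 1) (qn : Int) = 0 ∨ (i : Int) = (X.length : Int) - 1 then
            (0, st.2 ++ [[PySem.List.pyGetD (PySem.List.pyGetD X tmp []) 0 0, p]])
          else (p, st.2)) (p, acc)).2
      = acc ++ runA qn tail (qn - k % qn) p := by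
  intro tail
  induction tail with
  | nil =>
    intro k p acc hdrop
    have hk : X.length ≤ k := by
      have := congrArg List.length hdrop
      simp at this; omega
    have : X.length - k = 0 := by omega
    rw [this]
    simp [runA]
  | cons r rest ih =>
    intro k p acc hdrop
    have hklt : k < X.length := by
      by_contra hge
      rw [List.drop_eq_nil_of_le (by simp; omega)] at hdrop
      exact (List.cons_ne_nil r rest) hdrop.symm
    have hdrop2 := List.drop_eq_getElem_cons (l := X.reverse) (i := k) (by simpa using hklt)
    rw [hdrop] at hdrop2
    injection hdrop2 with hr hrest
    have hrow : PySem.List.pyGetD X ((X.length : Int) - (k : Int) - 1) [] = r := by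
      have hcast : (X.length : Int) - (k : Int) - 1 = ((X.length - 1 - k : Nat) : Int) := by
        omega
      rw [hcast, PySem.List.pyGetD_natCast]
      rw [List.getD_eq_getElem _ _ (by omega)]
      rw [hr, List.getElem_reverse]
    -- peel one iteration
    have hsub : X.length - k = (X.length - (k + 1)) + 1 := by omega
    rw [hsub, List.range'_succ, List.foldl_cons]
    -- the two tests agree
    have hmod : (PySem.Int.mod ((k : Int) + 1) (qn : Int) = 0) ↔ ((k + 1) % qn = 0) := by
      have h1 : ((k : Int) + 1) = ((k + 1 : Nat) : Int) := by push_cast; ring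
      rw [h1, PySem.Int.mod_natCast]
      exact Int.natCast_eq_zero
    have hlast : ((k : Int) = (X.length : Int) - 1) ↔ (rest = []) := by
      constructor
      · intro h
        rw [hrest]
        apply List.drop_eq_nil_of_le
        simp; omega
      · intro h
        rw [h] at hrest
        have := congrArg List.length hrest
        simp at this
        omega
    by_cases hemit : (k + 1) % qn = 0 ∨ rest = []
    · -- emission step
      have hcond : PySem.Int.mod ((k : Int) + 1) (qn : Int) = 0 ∨ (k : Int) = (X.length : Int) - 1 := by
        rcases hemit with h | h
        · exact Or.inl (hmod.mpr h)
        · exact Or.inr (hlast.mpr h)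
      simp only [hrow, if_pos hcond]
      rw [ih (k + 1) 0 (acc ++ [[PySem.List.pyGetD r 0 0, p + PySem.List.pyGetD r 1 0]]) hrest.symm]
      have hc1 : qn - k % qn = 1 ∨ rest = [] := by
        rcases hemit with h | h
        · left
          rw [mod_succ_eq qn k hq] at h
          split_ifs at h with h2
          · omega
        · exact Or.inr h
      have hstep : runA qn (r :: rest) (qn - k % qn) p
          = [PySem.List.pyGetD r 0 0, p + PySem.List.pyGetD r 1 0] :: runA qn rest qn 0 := by
        simp only [runA]
        rw [if_pos hc1]
      have hcounter : runA qn rest (qn - (k + 1) % qn) 0 = runA qn rest qn 0 := by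
        rcases Decidable.em (rest = []) with hre | hre
        · subst hre; simp [runA]
        · have hk1 : (k + 1) % qn = 0 := by
            rcases hemit with h | h
            · exact h
            · exact absurd h hre
          rw [hk1]
          norm_num
      rw [hcounter, hstep]
      simp [List.append_assoc]
    · -- non-emission step
      push Not at hemit
      obtain ⟨hm, hre⟩ := hemit
      have hcond : ¬ (PySem.Int.mod ((k : Int) + 1) (qn : Int) = 0 ∨ (k : Int) = (X.length : Int) - 1) := by
        push Not
        exact ⟨fun h => hm (hmod.mp h), fun h => hre (hlast.mp h)⟩
      simp only [hrow, if_neg hcond]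
      rw [ih (k + 1) (p + PySem.List.pyGetD r 1 0) acc hrest.symm]
      have hklt2 : k % qn < qn := Nat.mod_lt k (by omega)
      have hmod2 : (k + 1) % qn = k % qn + 1 := by
        rw [mod_succ_eq qn k hq]
        split_ifs with h2
        · exfalso; apply hm; rw [mod_succ_eq qn k hq, if_pos h2]
        · rfl
      have hne1 : ¬ (qn - k % qn = 1 ∨ rest = []) := by
        push Not
        refine ⟨?_, hre⟩
        intro h1
        apply hm
        rw [mod_succ_eq qn k hq, if_pos (by omega)]
      have hstep : runA qn (r :: rest) (qn - k % qn) p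
          = runA qn rest (qn - k % qn - 1) (p + PySem.List.pyGetD r 1 0) := by
        simp only [runA]
        rw [if_neg hne1]
      rw [hstep]
      have hcnt : qn - (k + 1) % qn = qn - k % qn - 1 := by omega
      rw [hcnt]

-- ===== VERDICT (by name: the statement is the Claim_ definition above) =====
theorem resample_T_spec : Claim_equal_resample_T := by
  intro X cut hdom hpre
  obtain ⟨hcut, hrows⟩ := hpre
  unfold Spec_resample_T
  rcases Decidable.em (X = []) with hnil | hnil
  · subst hnil
    simp [resample_T, resample_T_alt, bLoop, PySem.List.pyRange]
  · have hcutpos : 0 < cut := by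
      rcases hcut with h | h
      · exact h
      · exact absurd h.1 hnil
    have hlen : 1 ≤ X.length := List.length_pos_iff.mpr hnil
    set q : Int := -(PySem.Int.floordiv (-(X.length : Int)) cut) with hqdef
    have hq1 : 1 ≤ q := by
      have h := (PySem.Int.floordiv_lt_iff_lt_mul (a := -(X.length : Int)) (b := cut) (q := 0) hcutpos)
      have h2 : PySem.Int.floordiv (-(X.length : Int)) cut < 0 := by
        apply h.mpr
        have : (1 : Int) ≤ (X.length : Int) := by exact_mod_cast hlen
        omega
      omega
    have hqcast : q = ((q.toNat : Nat) : Int) := (Int.toNat_of_nonneg (by omega)).symm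
    have hqn : 1 ≤ q.toNat := by omega
    show resample_T X cut = resample_T_alt X cut
    simp only [resample_T, resample_T_alt, ← hqdef]
    rw [hqcast, bLoop_eq_runA q.toNat hqn X.reverse.length X.reverse le_rfl]
    rw [PySem.List.pyRange_zero_natCast, List.foldl_map, List.range_eq_range']
    have hfold := foldA_eq_runA X q.toNat hqn X.reverse 0 0 [] (by simp)
    simp only [Nat.sub_zero, Nat.zero_mod, List.nil_append] at hfold
    rw [hfold]
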